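-- pv_equiv track=rewrite | github.com/DMGiulioRomano/PGE-ls | granular_ls/yaml_analyzer.py | _parent_is_streams
-- ===== SOURCE A (Python) =====
-- def _parent_is_streams(lines: list, current_line_idx: int) -> bool:
--     """
--     Ritorna True se la riga padre (a indent 0) e' 'streams:'.
--     Usato per rilevare il livello lista dove inserire nuovi stream.
--     """
--     for i in range(current_line_idx - 1, -1, -1):
--         line = lines[i]
--         stripped = line.strip()
--         if not stripped or stripped.startswith('#'):
--             continue
--         leading = len(line) - len(line.lstrip())
--         if leading == 0:
--             return stripped.startswith('streams:') or stripped == 'streams:'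
--     return False
-- ===== SOURCE B (Python) =====
-- def _parent_is_streams(lines: list, current_line_idx: int) -> bool:
--     """Forward pass: remember the last zero-indent, non-blank, non-comment
--     line before current_line_idx; True iff it starts with 'streams:'."""
--     parent = None
--     for i in range(current_line_idx):
--         line = lines[i]
--         stripped = line.strip()
--         if not stripped or stripped.startswith('#'):
--             continue
--         if len(line) - len(line.lstrip()) == 0:
--             parent = stripped
--     return parent is not None and parent.startswith('streams:')
-- ===== Notes on version B (the rewrite author's own statement) =====
-- stated objective: alternative
-- what changed: Replaces the backward early-returning scan for the nearest zero-indent line with a forward accumulator pass that remembers the last zero-indent significant line and tests it once at the end.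
import Mathlib
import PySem

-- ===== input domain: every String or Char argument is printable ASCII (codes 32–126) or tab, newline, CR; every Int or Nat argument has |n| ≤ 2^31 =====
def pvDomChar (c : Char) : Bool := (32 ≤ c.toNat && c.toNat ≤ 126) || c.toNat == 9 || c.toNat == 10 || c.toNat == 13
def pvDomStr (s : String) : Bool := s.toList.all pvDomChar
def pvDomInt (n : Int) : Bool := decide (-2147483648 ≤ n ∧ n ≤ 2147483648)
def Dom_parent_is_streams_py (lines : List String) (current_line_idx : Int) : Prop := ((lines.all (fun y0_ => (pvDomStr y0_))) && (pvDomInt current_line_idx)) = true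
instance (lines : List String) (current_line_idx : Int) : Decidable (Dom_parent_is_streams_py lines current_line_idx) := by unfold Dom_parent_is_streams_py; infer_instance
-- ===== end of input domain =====

-- B replaces A's backward early-returning scan by a forward pass that remembers
-- the last zero-indent significant line and tests it once at the end (alternative decomposition).

-- ===== PORT A =====
-- backward loop 'for i in range(current_line_idx - 1, -1, -1)' with early return
def pvALoop (lines : List String) : List Int → Bool
  | [] => false
  | i :: rest =>
      let line := PySem.List.pyGetD lines i ""   -- lines[i]; in range under Pre_
      let stripped := PySem.Str.strip line
      if stripped = "" || PySem.Str.startswith stripped "#" then pvALoop lines rest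
      else if PySem.Str.len line - PySem.Str.len (PySem.Str.lstrip line) = 0 then
        PySem.Str.startswith stripped "streams:" || stripped == "streams:"
      else pvALoop lines rest

def parent_is_streams_py (lines : List String) (current_line_idx : Int) : Bool :=
  pvALoop lines (PySem.List.pyRange (current_line_idx - 1) (-1) (-1))

-- ===== PORT B =====
-- loop body: update the remembered parent (last zero-indent significant line)
def pvBStep (parent : Option String) (line : String) : Option String :=
  let stripped := PySem.Str.strip line
  if stripped = "" || PySem.Str.startswith stripped "#" then parent
  else if PySem.Str.len line - PySem.Str.len (PySem.Str.lstrip line) = 0 then some stripped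
  else parent

def parent_is_streams_py_alt (lines : List String) (current_line_idx : Int) : Bool :=
  match (PySem.List.pyRange 0 current_line_idx 1).foldl
      (fun parent i => pvBStep parent (PySem.List.pyGetD lines i "")) none with
  | none => false
  | some p => PySem.Str.startswith p "streams:"

-- ===== PRECONDITION & SPEC =====
-- Pre_ excludes exactly current_line_idx > len(lines), where both Pythons raise IndexError.
def Pre_parent_is_streams_py (lines : List String) (current_line_idx : Int) : Prop :=
  current_line_idx ≤ (lines.length : Int)
instance (lines : List String) (current_line_idx : Int) : Decidable (Pre_parent_is_streams_py lines current_line_idx) := by unfold Pre_parent_is_streams_py; infer_instance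

def pvWitness_parent_is_streams_py : List String × Int := (["streams:", "  a: 1"], 2)

def Spec_parent_is_streams_py (lines : List String) (current_line_idx : Int) (out : Bool) : Prop := out = parent_is_streams_py_alt lines current_line_idx
instance (lines : List String) (current_line_idx : Int) (out : Bool) : Decidable (Spec_parent_is_streams_py lines current_line_idx out) := by unfold Spec_parent_is_streams_py; infer_instance

-- ===== CLAIM (what is proved, stated in full; the proofs are below) =====
def Claim_equal_parent_is_streams_py : Prop := ∀ (lines : List String) (current_line_idx : Int), Dom_parent_is_streams_py lines current_line_idx → Pre_parent_is_streams_py lines current_line_idx → Spec_parent_is_streams_py lines current_line_idx (parent_is_streams_py lines current_line_idx)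

-- ===== LEMMAS AND PROOFS =====

-- A's scan phrased directly on the list of lines it visits (in visiting order)
def pvARec : List String → Bool
  | [] => false
  | line :: rest =>
      let stripped := PySem.Str.strip line
      if stripped = "" || PySem.Str.startswith stripped "#" then pvARec rest
      else if PySem.Str.len line - PySem.Str.len (PySem.Str.lstrip line) = 0 then
        PySem.Str.startswith stripped "streams:" || stripped == "streams:"
      else pvARec rest

def pvFinal (parent : Option String) : Bool :=
  match parent with
  | none => false
  | some p => PySem.Str.startswith p "streams:"

theorem pvALoop_eq_pvARec (lines : List String) (idxs : List Int) :
    pvALoop lines idxs = pvARec (idxs.map (fun i => PySem.List.pyGetD lines i "")) := by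
  induction idxs with
  | nil => rfl
  | cons i rest ih => simp only [pvALoop, pvARec, List.map_cons, ih]

theorem pv_or_eq_self (s : String) :
    (PySem.Str.startswith s "streams:" || s == "streams:") = PySem.Str.startswith s "streams:" := by
  by_cases h : s = "streams:"
  · subst h; decide
  · simp [h]

theorem pvARec_reverse_eq (r : List String) :
    pvARec r = pvFinal (r.reverse.foldl pvBStep none) := by
  induction r with
  | nil => rfl
  | cons x r' ih =>
      simp only [pvARec, List.reverse_cons, List.foldl_append, List.foldl_cons, List.foldl_nil]
      rw [ih]
      generalize List.foldl pvBStep none r'.reverse = acc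
      unfold pvBStep
      split_ifs with hb h2
      · simp only [hb, if_true]
      · simp only [hb, if_true]
      · simp only [if_neg hb, pvFinal, pv_or_eq_self]
      · simp only [if_neg hb]

-- ===== VERDICT (by name: the statement is the Claim_ definition above) =====
theorem parent_is_streams_py_spec : Claim_equal_parent_is_streams_py := by
  intro lines c _ _
  unfold Spec_parent_is_streams_py parent_is_streams_py parent_is_streams_py_alt
  have hrev : PySem.List.pyRange (c - 1) (-1) (-1)
      = (PySem.List.pyRange 0 c 1).reverse := by
    have := PySem.List.pyRange_neg_one_eq_reverse (c - 1) (-1)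
    simpa using this
  rw [hrev, pvALoop_eq_pvARec, List.map_reverse,
    pvARec_reverse_eq, List.reverse_reverse, List.foldl_map]
  rfl
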